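-- pv_equiv track=rewrite | github.com/huegli/attic | Python/AtticCLI/attic_cli/editor.py | _diff_programs
-- ===== SOURCE A (Python) =====
-- def _parse_basic_lines(content: str) -> dict[int, str]:
--     """Parse BASIC source text into a {line_number: full_line} mapping.
--
--     Blank lines and lines that do not begin with a valid line number are
--     silently ignored.  The *full* original line (number + body) is kept as
--     the value so it can be injected verbatim.
--
--     Args:
--         content: Raw BASIC source text (e.g. from ``basic export``).
--
--     Returns:
--         Dictionary mapping line numbers to their complete source lines.
--     """
--     lines: dict[int, str] = {}
--     for raw in content.strip().splitlines():
--         raw = raw.strip()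
--         if not raw:
--             continue
--         parts = raw.split(None, 1)
--         try:
--             num = int(parts[0])
--             lines[num] = raw
--         except (ValueError, IndexError):
--             # Not a numbered BASIC line -- skip.
--             pass
--     return lines
--
-- def _diff_programs(
--     old_content: str, new_content: str
-- ) -> tuple[list[tuple[int, str]], list[tuple[int, str]], list[int]]:
--     """Compute the minimal set of changes between two BASIC programs.
--
--     Args:
--         old_content: The program text previously imported.
--         new_content: The program text after the user edited it.
--
--     Returns:
--         A three-tuple of ``(added, modified, deleted)`` where:
--
--         - *added*    -- list of ``(line_num, full_line)`` for new lines
--         - *modified* -- list of ``(line_num, full_line)`` for changed lines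
--         - *deleted*  -- sorted list of line numbers that were removed
--     """
--     old = _parse_basic_lines(old_content)
--     new = _parse_basic_lines(new_content)
--
--     old_nums = set(old)
--     new_nums = set(new)
--
--     added = [(n, new[n]) for n in sorted(new_nums - old_nums)]
--     deleted = sorted(old_nums - new_nums)
--     modified = [
--         (n, new[n]) for n in sorted(old_nums & new_nums) if old[n] != new[n]
--     ]
--
--     return added, modified, deleted
-- ===== SOURCE B (Python) =====
-- def _parse_basic_lines(content: str) -> dict[int, str]:
--     lines: dict[int, str] = {}
--     for raw in content.strip().splitlines():
--         raw = raw.strip()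
--         if not raw:
--             continue
--         parts = raw.split(None, 1)
--         try:
--             num = int(parts[0])
--             lines[num] = raw
--         except (ValueError, IndexError):
--             pass
--     return lines
--
--
-- def _diff_programs(
--     old_content: str, new_content: str
-- ) -> tuple[list[tuple[int, str]], list[tuple[int, str]], list[int]]:
--     """Single merged classifying pass over the sorted union of line numbers."""
--     old = _parse_basic_lines(old_content)
--     new = _parse_basic_lines(new_content)
--
--     added: list[tuple[int, str]] = []
--     modified: list[tuple[int, str]] = []
--     deleted: list[int] = []
--     for n in sorted(old.keys() | new.keys()):
--         old_line = old.get(n)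
--         new_line = new.get(n)
--         if old_line is None:
--             added.append((n, new_line))
--         elif new_line is None:
--             deleted.append(n)
--         elif old_line != new_line:
--             modified.append((n, new_line))
--     return added, modified, deleted
-- ===== Notes on version B (the rewrite author's own statement) =====
-- stated objective: alternative
-- what changed: Replaces the three separate set-difference/intersection comprehensions (each sorting its own set) with one merged classifying pass over the sorted union of line numbers, appending to added/modified/deleted by presence in each dict.
import Mathlib
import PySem

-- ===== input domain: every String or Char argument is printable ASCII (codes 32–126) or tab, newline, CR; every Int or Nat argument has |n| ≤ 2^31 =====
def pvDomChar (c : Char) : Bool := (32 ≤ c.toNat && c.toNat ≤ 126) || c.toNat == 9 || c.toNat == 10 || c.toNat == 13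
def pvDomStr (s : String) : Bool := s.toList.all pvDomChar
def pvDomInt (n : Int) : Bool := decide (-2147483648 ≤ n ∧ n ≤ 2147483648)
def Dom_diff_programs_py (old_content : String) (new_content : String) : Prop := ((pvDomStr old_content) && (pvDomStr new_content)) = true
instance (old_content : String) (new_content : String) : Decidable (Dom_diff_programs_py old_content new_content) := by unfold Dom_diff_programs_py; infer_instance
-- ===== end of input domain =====

-- B replaces A's three sorted set-difference/intersection comprehensions by one merged
-- classifying pass over the sorted union of line numbers (alternative decomposition, same cost).

-- ===== PORT A =====
-- shared helper: _parse_basic_lines (identical in both Pythons); one loop step of its for-loop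
def parseStep (d : PySem.Dict Int String) (raw0 : String) : PySem.Dict Int String :=
  let raw := PySem.Str.strip raw0
  if raw = "" then d                                   -- 'if not raw: continue'
  else
    let parts := PySem.Str.split₀Max raw 1             -- raw.split(None, 1)
    match PySem.List.pyGet? parts 0 with               -- parts[0]; none = IndexError → except: skip
    | none => d
    | some p0 =>
      match PySem.Int.ofStr? p0 with                   -- int(parts[0]); none = ValueError → except: skip
      | none => d
      | some num => d.insert num raw                   -- lines[num] = raw

def parseBasicLines (content : String) : PySem.Dict Int String :=
  (PySem.Str.splitlines (PySem.Str.strip content)).foldl parseStep PySem.Dict.empty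

def diff_programs_py (old_content : String) (new_content : String) : (List (Int × String)) × (List (Int × String)) × List Int :=
  let old := parseBasicLines old_content
  let new := parseBasicLines new_content
  let old_nums : PySem.Set Int := PySem.Set.ofList old.keys
  let new_nums : PySem.Set Int := PySem.Set.ofList new.keys
  -- new[n] is total here (n ∈ new); ported as get? with getD "" (the default is never used)
  let added := (PySem.List.sorted (PySem.Set.diff new_nums old_nums) (fun x => x) false).map
    (fun n => (n, (new.get? n).getD ""))
  let deleted := PySem.List.sorted (PySem.Set.diff old_nums new_nums) (fun x => x) false
  let modified := ((PySem.List.sorted (PySem.Set.inter old_nums new_nums) (fun x => x) false).filter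
      (fun n => (old.get? n).getD "" ≠ (new.get? n).getD "")).map
    (fun n => (n, (new.get? n).getD ""))
  (added, modified, deleted)

-- ===== PORT B =====
-- one loop step of Source B's classifying for-loop
def classifyStep (old new : PySem.Dict Int String)
    (acc : (List (Int × String)) × (List (Int × String)) × List Int) (n : Int) :
    (List (Int × String)) × (List (Int × String)) × List Int :=
  match old.get? n, new.get? n with                    -- old.get(n), new.get(n)
  | none, new_line => (acc.1 ++ [(n, new_line.getD "")], acc.2.1, acc.2.2)  -- added (n ∈ union so new_line is some)
  | some _, none => (acc.1, acc.2.1, acc.2.2 ++ [n])                         -- deleted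
  | some ol, some nl =>
      if ol ≠ nl then (acc.1, acc.2.1 ++ [(n, nl)], acc.2.2) else acc        -- modified

def diff_programs_py_alt (old_content : String) (new_content : String) : (List (Int × String)) × (List (Int × String)) × List Int :=
  let old := parseBasicLines old_content
  let new := parseBasicLines new_content
  (PySem.List.sorted (PySem.Set.union (PySem.Set.ofList old.keys) new.keys) (fun x => x) false).foldl
    (classifyStep old new) ([], [], [])

-- ===== PRECONDITION & SPEC =====
def Spec_diff_programs_py (old_content : String) (new_content : String) (out : (List (Int × String)) × (List (Int × String)) × List Int) : Prop := out = diff_programs_py_alt old_content new_content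
instance (old_content : String) (new_content : String) (out : (List (Int × String)) × (List (Int × String)) × List Int) : Decidable (Spec_diff_programs_py old_content new_content out) := by unfold Spec_diff_programs_py; infer_instance

-- ===== CLAIM (what is proved, stated in full; the proofs are below) =====
def Claim_equal_diff_programs_py : Prop := ∀ (old_content : String) (new_content : String), Dom_diff_programs_py old_content new_content → Spec_diff_programs_py old_content new_content (diff_programs_py old_content new_content)

-- ===== LEMMAS AND PROOFS =====

-- Bool classifiers matching the three branches of classifyStep
def isAddB (old _new : PySem.Dict Int String) (n : Int) : Bool :=
  (old.get? n).isNone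
def isDelB (old new : PySem.Dict Int String) (n : Int) : Bool :=
  (old.get? n).isSome && (new.get? n).isNone
def isModB (old new : PySem.Dict Int String) (n : Int) : Bool :=
  match old.get? n, new.get? n with
  | some ol, some nl => ol ≠ nl
  | _, _ => false

-- the fold appends exactly the three filtered/mapped lists
theorem foldl_classify (old new : PySem.Dict Int String) (nums : List Int)
    (a m d : List _) :
    nums.foldl (classifyStep old new) (a, (m, d)) =
      (a ++ (nums.filter (isAddB old new)).map (fun n => (n, (new.get? n).getD "")),
       m ++ (nums.filter (isModB old new)).map (fun n => (n, (new.get? n).getD "")),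
       d ++ nums.filter (isDelB old new)) := by
  induction nums generalizing a m d with
  | nil => simp
  | cons x xs ih =>
    simp only [List.foldl_cons]
    rcases ho : old.get? x with _ | ol <;> rcases hn : new.get? x with _ | nl
    · simp only [classifyStep, ho, hn]; rw [ih]
      simp [isAddB, isDelB, isModB, ho, hn]
    · simp only [classifyStep, ho, hn]; rw [ih]
      simp [isAddB, isDelB, isModB, ho, hn]
    · simp only [classifyStep, ho, hn]; rw [ih]
      simp [isAddB, isDelB, isModB, ho, hn]
    · by_cases hne : ol = nl
      · simp only [classifyStep, ho, hn, hne, ne_eq, not_true_eq_false, if_neg, not_false_eq_true]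
        rw [ih]
        simp [isAddB, isDelB, isModB, ho, hn, hne]
      · simp only [classifyStep, ho, hn, hne, ne_eq, not_false_eq_true, ite_true]
        rw [ih]
        simp [isAddB, isDelB, isModB, ho, hn, hne]

def bothB (old new : PySem.Dict Int String) (n : Int) : Bool :=
  (old.get? n).isSome && (new.get? n).isSome

theorem diff_eq (old new : PySem.Dict Int String) :
    ((PySem.List.sorted (PySem.Set.diff (PySem.Set.ofList new.keys) (PySem.Set.ofList old.keys)) (fun x => x) false).map
        (fun n => (n, (new.get? n).getD "")),
     ((PySem.List.sorted (PySem.Set.inter (PySem.Set.ofList old.keys) (PySem.Set.ofList new.keys)) (fun x => x) false).filter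
        (fun n => (old.get? n).getD "" ≠ (new.get? n).getD "")).map
        (fun n => (n, (new.get? n).getD "")),
     PySem.List.sorted (PySem.Set.diff (PySem.Set.ofList old.keys) (PySem.Set.ofList new.keys)) (fun x => x) false) =
    (PySem.List.sorted (PySem.Set.union (PySem.Set.ofList old.keys) new.keys) (fun x => x) false).foldl
      (classifyStep old new) ([], [], []) := by
  rw [foldl_classify]
  simp only [List.nil_append]
  set nums := PySem.List.sorted (PySem.Set.union (PySem.Set.ofList old.keys) new.keys) (fun x => x) false with hnumsdef
  have hnodup : nums.Nodup :=
    (PySem.List.sorted_perm _ _ _).nodup_iff.mpr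
      (PySem.Set.nodup_union _ _ (PySem.Set.nodup_ofList _))
  have hle : nums.Pairwise (· ≤ ·) := by
    simpa using PySem.List.sorted_pairwise (PySem.Set.union (PySem.Set.ofList old.keys) new.keys) (fun x => x)
  have hlt : nums.Pairwise (· < ·) :=
    (hle.and hnodup).imp fun h => lt_of_le_of_ne h.1 h.2
  have hmem : ∀ x : Int, x ∈ nums ↔ x ∈ old.keys ∨ x ∈ new.keys := by
    intro x
    rw [hnumsdef, PySem.List.mem_sorted, PySem.Set.mem_union, PySem.Set.mem_ofList]
  -- generic: sorted of a set with the same membership as nums.filter p equals nums.filter p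
  have key : ∀ (s : List Int) (p : Int → Bool), s.Nodup →
      (∀ x, x ∈ s ↔ x ∈ nums ∧ p x = true) →
      PySem.List.sorted s (fun x => x) false = nums.filter p := by
    intro s p hs hiff
    apply PySem.List.sorted_eq_of_perm_of_pairwise_lt
    · refine (List.perm_ext_iff_of_nodup (hnodup.filter _) hs).mpr ?_
      intro x
      rw [List.mem_filter, hiff]
    · exact hlt.filter _
  have hgo : ∀ x : Int, old.get? x = none ↔ x ∉ old.keys :=
    fun x => PySem.Dict.get?_eq_none_iff_not_mem_keys _ _
  have hgn : ∀ x : Int, new.get? x = none ↔ x ∉ new.keys :=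
    fun x => PySem.Dict.get?_eq_none_iff_not_mem_keys _ _
  refine Prod.ext ?_ (Prod.ext ?_ ?_)
  · -- added
    dsimp only
    congr 1
    apply key _ _ (PySem.Set.nodup_diff _ _ (PySem.Set.nodup_ofList _))
    intro x
    rw [PySem.Set.mem_diff, PySem.Set.mem_ofList, PySem.Set.mem_ofList, hmem]
    constructor
    · rintro ⟨h1, h2⟩
      refine ⟨Or.inr h1, ?_⟩
      simp [isAddB, (hgo x).mpr h2]
    · rintro ⟨h1, h2⟩
      have : old.get? x = none := by
        simp only [isAddB, Option.isNone_iff_eq_none] at h2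
        exact h2
      have hno := (hgo x).mp this
      exact ⟨h1.resolve_left hno, hno⟩
  · -- modified
    dsimp only
    congr 1
    have hinter : PySem.List.sorted (PySem.Set.inter (PySem.Set.ofList old.keys) (PySem.Set.ofList new.keys)) (fun x => x) false
        = nums.filter (bothB old new) := by
      apply key _ _ (PySem.Set.nodup_inter _ _ (PySem.Set.nodup_ofList _))
      intro x
      rw [PySem.Set.mem_inter, PySem.Set.mem_ofList, PySem.Set.mem_ofList, hmem]
      constructor
      · rintro ⟨h1, h2⟩
        refine ⟨Or.inl h1, ?_⟩
        simp only [bothB, Bool.and_eq_true, Option.isSome_iff_ne_none, ne_eq, hgo, hgn]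
        exact ⟨fun hc => hc h1, fun hc => hc h2⟩
      · rintro ⟨h1, h2⟩
        simp only [bothB, Bool.and_eq_true, Option.isSome_iff_ne_none, ne_eq, hgo, hgn,
          not_not] at h2
        exact h2
    rw [hinter, List.filter_filter]
    congr 1
    funext x
    rcases o1 : old.get? x with _ | ol <;> rcases n1 : new.get? x with _ | nl <;>
      simp [isModB, bothB, o1, n1]
  · -- deleted
    dsimp only
    apply key _ _ (PySem.Set.nodup_diff _ _ (PySem.Set.nodup_ofList _))
    intro x
    rw [PySem.Set.mem_diff, PySem.Set.mem_ofList, PySem.Set.mem_ofList, hmem]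
    constructor
    · rintro ⟨h1, h2⟩
      refine ⟨Or.inl h1, ?_⟩
      simp only [isDelB, Bool.and_eq_true, Option.isSome_iff_ne_none, ne_eq, hgo,
        Option.isNone_iff_eq_none, hgn]
      exact ⟨fun hc => hc h1, h2⟩
    · rintro ⟨h1, h2⟩
      simp only [isDelB, Bool.and_eq_true, Option.isSome_iff_ne_none, ne_eq, hgo,
        Option.isNone_iff_eq_none, hgn, not_not] at h2
      exact h2

-- ===== VERDICT (by name: the statement is the Claim_ definition above) =====
theorem diff_programs_py_spec : Claim_equal_diff_programs_py := by
  intro old_content new_content _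
  unfold Spec_diff_programs_py diff_programs_py diff_programs_py_alt
  exact diff_eq _ _
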